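-- pv_equiv track=rewrite | github.com/SBNoor/DCNN | preprocessingRealData.py | getSnpIndicesInSubWins
-- ===== SOURCE A (Python) =====
-- def getSnpIndicesInSubWins(subWinSize, lastSubWinEnd, snpLocs):
--     position_msOut = [[]]
--     subWinStart = 1
--     subWinEnd = subWinStart + subWinSize - 1
--     snpIndicesInSubWins = [[]]
--     for i in range(len(snpLocs)):
--         while snpLocs[i] <= lastSubWinEnd and not (snpLocs[i] >= subWinStart and snpLocs[i] <= subWinEnd):
--             subWinStart += subWinSize
--             subWinEnd += subWinSize
--             snpIndicesInSubWins.append([])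
--             position_msOut.append([])
--         if snpLocs[i] <= lastSubWinEnd:
--             snpIndicesInSubWins[-1].append(i)
--             position_msOut[-1].append(snpLocs[i])
--     while subWinEnd < lastSubWinEnd:
--         snpIndicesInSubWins.append([])
--         position_msOut.append([])
--         subWinStart += subWinSize
--         subWinEnd += subWinSize
--     return snpIndicesInSubWins,position_msOut
-- ===== SOURCE B (Python) =====
-- def getSnpIndicesInSubWins(subWinSize, lastSubWinEnd, snpLocs):
--     numWins = max(1, -(-lastSubWinEnd // subWinSize))
--     snpIndicesInSubWins = [[] for _ in range(numWins)]
--     position_msOut = [[] for _ in range(numWins)]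
--     for i, loc in enumerate(snpLocs):
--         if 1 <= loc <= lastSubWinEnd:
--             w = (loc - 1) // subWinSize
--             snpIndicesInSubWins[w].append(i)
--             position_msOut[w].append(loc)
--     return snpIndicesInSubWins, position_msOut
-- ===== Notes on version B (the rewrite author's own statement) =====
-- stated objective: simpler
-- what changed: B replaces A's forward boundary-advancing scan (a while loop moving the current window and appending buckets as it goes, plus a trailing fill loop) with a closed-form bucket index: it preallocates max(1, ceil(lastSubWinEnd/subWinSize)) empty windows and drops each SNP with 1 <= loc <= lastSubWinEnd directly into window (loc-1)//subWinSize in one pass.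
-- outside the precondition, e.g. on getSnpIndicesInSubWins(0, -3, [5]): A returns ([[]], [[]]), B raises ZeroDivisionError; on getSnpIndicesInSubWins(-2, -5, []): A returns ([[]], [[]]), B returns ([[], [], []], [[], [], []])
import Mathlib
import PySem

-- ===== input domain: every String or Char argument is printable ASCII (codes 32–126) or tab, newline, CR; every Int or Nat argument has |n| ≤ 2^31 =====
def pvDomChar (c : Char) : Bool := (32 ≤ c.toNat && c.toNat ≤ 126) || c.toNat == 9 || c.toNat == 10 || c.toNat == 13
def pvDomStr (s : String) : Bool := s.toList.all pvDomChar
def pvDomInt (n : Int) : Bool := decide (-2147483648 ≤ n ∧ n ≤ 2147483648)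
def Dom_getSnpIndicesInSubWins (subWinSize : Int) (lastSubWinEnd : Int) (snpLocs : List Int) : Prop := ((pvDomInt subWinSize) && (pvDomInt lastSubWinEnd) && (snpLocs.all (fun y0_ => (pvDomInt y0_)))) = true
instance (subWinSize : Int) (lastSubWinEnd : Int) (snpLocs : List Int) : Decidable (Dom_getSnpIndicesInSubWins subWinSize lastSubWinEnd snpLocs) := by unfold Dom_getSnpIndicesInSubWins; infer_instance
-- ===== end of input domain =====

-- B bins SNP positions by the closed-form window index (loc-1)//subWinSize into
-- max(1, ceil(lastSubWinEnd/subWinSize)) preallocated windows, instead of A's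
-- forward boundary-advancing scan; objective: simpler.


-- ===== PORT A =====
-- xss[-1].append(x) on a list of lists (xss is never empty in A)
def pvAppendLast (xss : List (List Int)) (x : Int) : List (List Int) :=
  match xss with
  | [] => []
  | [l] => [l ++ [x]]
  | l :: l2 :: t => l :: pvAppendLast (l2 :: t) x

-- the inner 'while' of A; fuel is an upper bound on the number of iterations
-- (sufficient whenever the Python loop terminates; on the stated Pre_ the proofs
-- show it is never exhausted)
def pvInnerWhile (fuel : Nat) (sws last loc st en : Int) (si pos : List (List Int)) :
    Int × Int × List (List Int) × List (List Int) :=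
  match fuel with
  | 0 => (st, en, si, pos)
  | f + 1 =>
    if loc ≤ last ∧ ¬(st ≤ loc ∧ loc ≤ en) then
      pvInnerWhile f sws last loc (st + sws) (en + sws) (si ++ [[]]) (pos ++ [[]])
    else (st, en, si, pos)

-- the 'for i in range(len(snpLocs))' loop of A
def pvOuter (sws last : Int) (items : List (Int × Int)) (st en : Int) (si pos : List (List Int)) :
    Int × Int × List (List Int) × List (List Int) :=
  match items with
  | [] => (st, en, si, pos)
  | (i, loc) :: rest =>
    let r := pvInnerWhile ((loc - en).toNat + 1) sws last loc st en si pos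
    if loc ≤ last then
      pvOuter sws last rest r.1 r.2.1 (pvAppendLast r.2.2.1 i) (pvAppendLast r.2.2.2 loc)
    else
      pvOuter sws last rest r.1 r.2.1 r.2.2.1 r.2.2.2

-- the trailing 'while subWinEnd < lastSubWinEnd' loop of A (fuel as above)
def pvTrail (fuel : Nat) (sws last st en : Int) (si pos : List (List Int)) :
    List (List Int) × List (List Int) :=
  match fuel with
  | 0 => (si, pos)
  | f + 1 =>
    if en < last then pvTrail f sws last (st + sws) (en + sws) (si ++ [[]]) (pos ++ [[]])
    else (si, pos)

def getSnpIndicesInSubWins (subWinSize : Int) (lastSubWinEnd : Int) (snpLocs : List Int) :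
    List (List Int) × List (List Int) :=
  let st : Int := 1
  let en : Int := st + subWinSize - 1
  let r := pvOuter subWinSize lastSubWinEnd (PySem.List.enumerate snpLocs 0) st en [[]] [[]]
  pvTrail ((lastSubWinEnd - r.2.1).toNat + 1) subWinSize lastSubWinEnd r.1 r.2.1 r.2.2.1 r.2.2.2

-- ===== PORT B =====
-- xss[w].append(x); in Source B w is always a valid nonnegative index under Pre_
def pvAppendAt (xss : List (List Int)) (w : Nat) (x : Int) : List (List Int) :=
  match xss, w with
  | [], _ => []
  | l :: t, 0 => (l ++ [x]) :: t
  | l :: t, w + 1 => l :: pvAppendAt t w x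

-- the body of Source B's single for loop
def pvBStep (sws last : Int) (acc : List (List Int) × List (List Int)) (p : Int × Int) :
    List (List Int) × List (List Int) :=
  if 1 ≤ p.2 ∧ p.2 ≤ last then
    (pvAppendAt acc.1 (PySem.Int.floordiv (p.2 - 1) sws).toNat p.1,
     pvAppendAt acc.2 (PySem.Int.floordiv (p.2 - 1) sws).toNat p.2)
  else acc

def getSnpIndicesInSubWins_alt (subWinSize : Int) (lastSubWinEnd : Int) (snpLocs : List Int) :
    List (List Int) × List (List Int) :=
  let numWins : Int := max 1 (-(PySem.Int.floordiv (-lastSubWinEnd) subWinSize))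
  (PySem.List.enumerate snpLocs 0).foldl (pvBStep subWinSize lastSubWinEnd)
    (List.replicate numWins.toNat [], List.replicate numWins.toNat [])

-- ===== PRECONDITION & SPEC =====
-- Pre_ excludes non-positive subWinSize and lists whose elements ≤ lastSubWinEnd are not a
-- nondecreasing run of positive positions: on most such inputs A's never-rewinding boundary
-- scan loops forever (and Source B divides by zero when subWinSize = 0), and where A does return
-- its window count/grouping is an accident of that scan.
def Pre_getSnpIndicesInSubWins (subWinSize : Int) (lastSubWinEnd : Int) (snpLocs : List Int) : Prop :=
  1 ≤ subWinSize ∧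
  (snpLocs.filter (fun x => decide (x ≤ lastSubWinEnd))).Pairwise (· ≤ ·) ∧
  ∀ x ∈ snpLocs.filter (fun x => decide (x ≤ lastSubWinEnd)), 1 ≤ x
instance (subWinSize : Int) (lastSubWinEnd : Int) (snpLocs : List Int) : Decidable (Pre_getSnpIndicesInSubWins subWinSize lastSubWinEnd snpLocs) := by unfold Pre_getSnpIndicesInSubWins; infer_instance

def pvWitness_getSnpIndicesInSubWins : Int × Int × List Int := (3, 10, [1, 2, 5, 9, 10, 12])

def Spec_getSnpIndicesInSubWins (subWinSize : Int) (lastSubWinEnd : Int) (snpLocs : List Int) (out : List (List Int) × List (List Int)) : Prop := out = getSnpIndicesInSubWins_alt subWinSize lastSubWinEnd snpLocs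
instance (subWinSize : Int) (lastSubWinEnd : Int) (snpLocs : List Int) (out : List (List Int) × List (List Int)) : Decidable (Spec_getSnpIndicesInSubWins subWinSize lastSubWinEnd snpLocs out) := by unfold Spec_getSnpIndicesInSubWins; infer_instance

-- ===== CLAIM (what is proved, stated in full; the proofs are below) =====
def Claim_equal_getSnpIndicesInSubWins : Prop := ∀ (subWinSize : Int) (lastSubWinEnd : Int) (snpLocs : List Int), Dom_getSnpIndicesInSubWins subWinSize lastSubWinEnd snpLocs → Pre_getSnpIndicesInSubWins subWinSize lastSubWinEnd snpLocs → Spec_getSnpIndicesInSubWins subWinSize lastSubWinEnd snpLocs (getSnpIndicesInSubWins subWinSize lastSubWinEnd snpLocs)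

-- ===== LEMMAS AND PROOFS =====

-- pad a bucket list with empty buckets up to N buckets
def pvPad (N : Nat) (xss : List (List Int)) : List (List Int) :=
  xss ++ List.replicate (N - xss.length) ([] : List Int)

lemma length_pvAppendLast (x : Int) : ∀ xss, (pvAppendLast xss x).length = xss.length
  | [] => rfl
  | [_] => rfl
  | _ :: l2 :: t => by
      simp [pvAppendLast, length_pvAppendLast x (l2 :: t)]

lemma pvPad_absorb (N k : Nat) (xss : List (List Int)) (h : xss.length + k ≤ N) :
    pvPad N (xss ++ List.replicate k ([] : List Int)) = pvPad N xss := by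
  unfold pvPad
  rw [List.append_assoc, ← List.replicate_add]
  congr 2
  simp
  omega

lemma pvPad_appendLast (x : Int) :
    ∀ (xss : List (List Int)) (N : Nat), xss ≠ [] → xss.length ≤ N →
      pvPad N (pvAppendLast xss x) = pvAppendAt (pvPad N xss) (xss.length - 1) x
  | [], _, hne, _ => absurd rfl hne
  | [l], N, _, hN => by
      simp [pvPad, pvAppendLast, pvAppendAt]
  | l :: l2 :: t, N, _, hN => by
      have ih := pvPad_appendLast x (l2 :: t) (N - 1) (by simp) (by simp at hN ⊢; omega)
      simp only [pvAppendLast]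
      have hpadc : ∀ (ys : List (List Int)), pvPad N (l :: ys) = l :: pvPad (N - 1) ys := by
        intro ys
        unfold pvPad
        simp only [List.cons_append]
        rw [show N - (l :: ys).length = (N - 1) - ys.length from by simp; omega]
      rw [hpadc, hpadc, ih]
      have : (l :: l2 :: t).length - 1 = ((l2 :: t).length - 1) + 1 := by simp
      rw [this]
      simp [pvAppendAt]

lemma inner_spec (sws last loc : Int) (hs : 1 ≤ sws) (hloc : loc ≤ last) :
    ∀ (fuel : Nat) (si pos : List (List Int)) (st en : Int), si ≠ [] → pos.length = si.length →
      st = ((si.length : Int) - 1) * sws + 1 → en = (si.length : Int) * sws →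
      st ≤ loc →
      (PySem.Int.floordiv (loc - 1) sws + 1 - (si.length : Int)).toNat < fuel →
      pvInnerWhile fuel sws last loc st en si pos
        = (PySem.Int.floordiv (loc - 1) sws * sws + 1,
           (PySem.Int.floordiv (loc - 1) sws + 1) * sws,
           si ++ List.replicate (PySem.Int.floordiv (loc - 1) sws + 1 - (si.length : Int)).toNat ([] : List Int),
           pos ++ List.replicate (PySem.Int.floordiv (loc - 1) sws + 1 - (si.length : Int)).toNat ([] : List Int)) := by
  intro fuel
  induction fuel with
  | zero => intro si pos st en _ _ _ _ _ hf; omega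
  | succ f ih =>
    intro si pos st en hne hlen hst hen hstle hf
    set j := PySem.Int.floordiv (loc - 1) sws with hjdef
    have hbr : j * sws ≤ loc - 1 ∧ loc - 1 < (j + 1) * sws :=
      (PySem.Int.floordiv_eq_iff_of_pos (by omega)).mp hjdef.symm
    have hm1 : 1 ≤ si.length := List.length_pos_of_ne_nil hne
    have hjm : (si.length : Int) - 1 ≤ j := by
      rw [hjdef, PySem.Int.le_floordiv_iff_mul_le (by omega)]
      omega
    by_cases hcase : (si.length : Int) ≤ j
    · -- loc is beyond the current window: advance
      have hlt : en < loc := by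
        have := mul_le_mul_of_nonneg_right hcase (by omega : (0:Int) ≤ sws)
        omega
      simp only [pvInnerWhile]
      rw [if_pos ⟨hloc, by push_neg; intro _; omega⟩]
      have hlen1 : ((si ++ [[]]).length : Int) = (si.length : Int) + 1 := by
        push_cast [List.length_append]
        simp
      rw [ih (si ++ [[]]) (pos ++ [[]]) (st + sws) (en + sws) (by simp) (by simp [hlen])
        (by rw [hlen1, hst]; ring) (by rw [hlen1, hen]; ring)
        (by have e3 : st + sws = (si.length : Int) * sws + 1 := by rw [hst]; ring
            omega)
        (by rw [hlen1]; omega)]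
      have hc2 : (j + 1 - (((si ++ [[]]).length : Int))).toNat + 1 = (j + 1 - (si.length : Int)).toNat := by
        rw [hlen1]; omega
      simp only [Prod.mk.injEq]
      refine ⟨trivial, trivial, ?_, ?_⟩ <;>
        · rw [List.append_assoc]
          congr 1
          rw [← hc2]
          simp [List.replicate_succ]
    · -- loc is in the current window: stop
      have hj' : j = (si.length : Int) - 1 := by omega
      have hin : loc ≤ en := by
        have h2 : loc - 1 < (j + 1) * sws := hbr.2
        have e : (j + 1) * sws = (si.length : Int) * sws := by rw [hj']; ring
        rw [e] at h2
        omega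
      simp only [pvInnerWhile]
      rw [if_neg (by push_neg; intro _; exact ⟨hstle, hin⟩)]
      have hc0 : (j + 1 - (si.length : Int)).toNat = 0 := by omega
      rw [hc0, hst, hen, hj']
      refine Prod.ext (by ring) (Prod.ext (by ring) (Prod.ext (by simp) (by simp)))

lemma outer_pad (sws last : Int) (hs : 1 ≤ sws) (N : Nat) (hNub : last ≤ (N : Int) * sws) :
    ∀ (rest : List (Int × Int)) (si pos : List (List Int)) (st en : Int),
      si ≠ [] → pos.length = si.length → si.length ≤ N →
      st = ((si.length : Int) - 1) * sws + 1 → en = (si.length : Int) * sws →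
      (∀ p ∈ rest, p.2 ≤ last → st ≤ p.2) →
      ((rest.map Prod.snd).filter (fun x => decide (x ≤ last))).Pairwise (· ≤ ·) →
      ∃ si' pos' : List (List Int),
        pvOuter sws last rest st en si pos
          = ((((si'.length : Int)) - 1) * sws + 1, (si'.length : Int) * sws, si', pos') ∧
        si' ≠ [] ∧ pos'.length = si'.length ∧ si'.length ≤ N ∧
        List.foldl (pvBStep sws last) (pvPad N si, pvPad N pos) rest = (pvPad N si', pvPad N pos') := by
  intro rest
  induction rest with
  | nil =>
    intro si pos st en hne hlen hNle hst hen _ _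
    exact ⟨si, pos, by rw [hst, hen]; rfl, hne, hlen, hNle, rfl⟩
  | cons hd rest ih =>
    obtain ⟨i, loc⟩ := hd
    intro si pos st en hne hlen hNle hst hen hmono hpw
    have hm1 : 1 ≤ si.length := List.length_pos_of_ne_nil hne
    by_cases hloc : loc ≤ last
    · -- in-range SNP
      have hstle : st ≤ loc := hmono (i, loc) (by simp) hloc
      set j := PySem.Int.floordiv (loc - 1) sws with hjdef
      have hbr : j * sws ≤ loc - 1 ∧ loc - 1 < (j + 1) * sws :=
        (PySem.Int.floordiv_eq_iff_of_pos (by omega)).mp hjdef.symm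
      have hjm : (si.length : Int) - 1 ≤ j := by
        rw [hjdef, PySem.Int.le_floordiv_iff_mul_le (by omega)]
        omega
      have hjN : j < (N : Int) := by
        rw [hjdef, PySem.Int.floordiv_lt_iff_lt_mul (by omega)]
        omega
      have hj0 : 0 ≤ j := by omega
      have hfuel : (j + 1 - (si.length : Int)).toNat < (loc - en).toNat + 1 := by
        rcases le_or_gt (j + 1) (si.length : Int) with h | h
        · omega
        · have h1 : (si.length : Int) ≤ j := by omega
          have h3 : j + 1 - (si.length : Int) ≤ j * sws + 1 - (si.length : Int) * sws := by
            nlinarith [mul_le_mul_of_nonneg_left hs (by omega : (0:Int) ≤ j - (si.length : Int))]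
          rw [hen]
          omega
      -- the head loc is ≤ all later in-range elements (Pairwise on the filtered list)
      have hfil : ((loc :: rest.map Prod.snd).filter (fun x => decide (x ≤ last))).Pairwise (· ≤ ·) := by
        simpa using hpw
      rw [List.filter_cons_of_pos (by simpa using hloc)] at hfil
      have hle_rest : ∀ p ∈ rest, p.2 ≤ last → loc ≤ p.2 := by
        intro p hp hple
        apply (List.pairwise_cons.mp hfil).1 p.2
        simp only [List.mem_filter, List.mem_map]
        exact ⟨⟨p, hp, rfl⟩, by simpa using hple⟩
      have hpw' : ((rest.map Prod.snd).filter (fun x => decide (x ≤ last))).Pairwise (· ≤ ·) :=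
        (List.pairwise_cons.mp hfil).2
      -- unfold one step of pvOuter
      simp only [pvOuter]
      rw [inner_spec sws last loc hs hloc _ si pos st en hne hlen hst hen hstle hfuel]
      rw [if_pos hloc]
      simp only
      set si1 := si ++ List.replicate (j + 1 - (si.length : Int)).toNat ([] : List Int) with hsi1
      set pos1 := pos ++ List.replicate (j + 1 - (si.length : Int)).toNat ([] : List Int) with hpos1
      have hsi1ne : si1 ≠ [] := by
        rw [hsi1]; cases si
        · exact absurd rfl hne
        · simp
      have hsi1len : (si1.length : Int) = j + 1 := by
        rw [hsi1]; push_cast [List.length_append, List.length_replicate]; omega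
      have hpos1len : pos1.length = si1.length := by rw [hsi1, hpos1]; simp [hlen]
      set si2 := pvAppendLast si1 i with hsi2
      set pos2 := pvAppendLast pos1 loc with hpos2
      have hsi2len : si2.length = si1.length := length_pvAppendLast i si1
      have hpos2len : pos2.length = pos1.length := length_pvAppendLast loc pos1
      have hsi2ne : si2 ≠ [] := by
        intro h
        rw [← List.length_eq_zero_iff] at h
        rw [hsi2len, List.length_eq_zero_iff] at h
        exact hsi1ne h
      have hsi2lenInt : (si2.length : Int) = j + 1 := by rw [hsi2len]; exact hsi1len
      have hsi2N : si2.length ≤ N := by omega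
      have hmono' : ∀ p ∈ rest, p.2 ≤ last → j * sws + 1 ≤ p.2 := by
        intro p hp hple
        have h1 := hle_rest p hp hple
        omega
      obtain ⟨si', pos', heq, hne', hlen', hN', hfold⟩ :=
        ih si2 pos2 (j * sws + 1) ((j + 1) * sws) hsi2ne
          (by rw [hpos2len, hpos1len, hsi2len])
          hsi2N (by rw [hsi2lenInt]; ring) (by rw [hsi2lenInt])
          hmono' hpw'
      refine ⟨si', pos', heq, hne', hlen', hN', ?_⟩
      rw [List.foldl_cons]
      have hguard : (1 : Int) ≤ loc := by
        have h0 : (0:Int) ≤ ((si.length : Int) - 1) * sws :=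
          mul_nonneg (by omega) (by omega)
        omega
      have hBstep : pvBStep sws last (pvPad N si, pvPad N pos) (i, loc)
          = (pvAppendAt (pvPad N si) j.toNat i, pvAppendAt (pvPad N pos) j.toNat loc) := by
        simp only [pvBStep]
        rw [if_pos ⟨hguard, hloc⟩]
      rw [hBstep]
      have habsorb : pvPad N si1 = pvPad N si := by
        rw [hsi1]
        exact pvPad_absorb N _ si (by omega)
      have habsorbp : pvPad N pos1 = pvPad N pos := by
        rw [hpos1]
        apply pvPad_absorb
        omega
      have hidx : si1.length - 1 = j.toNat := by omega
      have hidxp : pos1.length - 1 = j.toNat := by rw [hpos1len]; omega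
      have hA : pvPad N si2 = pvAppendAt (pvPad N si) j.toNat i := by
        rw [hsi2, pvPad_appendLast i si1 N hsi1ne (by omega), hidx, habsorb]
      have hAp : pvPad N pos2 = pvAppendAt (pvPad N pos) j.toNat loc := by
        have hpos1ne : pos1 ≠ [] := by
          rw [← List.length_pos_iff_ne_nil] at hsi1ne ⊢
          omega
        rw [hpos2, pvPad_appendLast loc pos1 N hpos1ne (by omega), hidxp, habsorbp]
      rw [← hA, ← hAp]
      exact hfold
    · -- out-of-range SNP: both sides skip it
      simp only [pvOuter, pvInnerWhile]
      have hcond : ¬(loc ≤ last ∧ ¬(st ≤ loc ∧ loc ≤ en)) := fun hc => hloc hc.1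
      simp only [if_neg hcond, if_neg hloc]
      have hpw' : ((rest.map Prod.snd).filter (fun x => decide (x ≤ last))).Pairwise (· ≤ ·) := by
        have h1 : ((loc :: rest.map Prod.snd).filter (fun x => decide (x ≤ last))).Pairwise (· ≤ ·) := by
          simpa using hpw
        rwa [List.filter_cons_of_neg (by simpa using hloc)] at h1
      obtain ⟨si', pos', heq, hne', hlen', hN', hfold⟩ :=
        ih si pos st en hne hlen hNle hst hen (fun p hp h => hmono p (by simp [hp]) h) hpw'
      refine ⟨si', pos', heq, hne', hlen', hN', ?_⟩
      rw [List.foldl_cons]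
      have hskip : pvBStep sws last (pvPad N si, pvPad N pos) (i, loc) = (pvPad N si, pvPad N pos) := by
        simp only [pvBStep]
        rw [if_neg (by intro hcontra; exact hloc hcontra.2)]
      rw [hskip]
      exact hfold

lemma trail_pad (sws last : Int) (hs : 1 ≤ sws) (N : Nat)
    (hNub : last ≤ (N : Int) * sws)
    (hNlt : ∀ t : Nat, 1 ≤ t → t < N → (t : Int) * sws < last) :
    ∀ (fuel : Nat) (si pos : List (List Int)) (st en : Int),
      si ≠ [] → pos.length = si.length → si.length ≤ N →
      en = (si.length : Int) * sws → N - si.length < fuel →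
      pvTrail fuel sws last st en si pos = (pvPad N si, pvPad N pos) := by
  intro fuel
  induction fuel with
  | zero => intro si pos st en _ _ _ _ hf; omega
  | succ f ih =>
    intro si pos st en hne hlen hNle hen hf
    have hm1 : 1 ≤ si.length := List.length_pos_of_ne_nil hne
    by_cases hfull : si.length = N
    · simp only [pvTrail]
      rw [if_neg (by rw [hen, hfull]; omega)]
      simp [pvPad, hfull, hlen]
    · have hlt : si.length < N := by omega
      have hcond : en < last := by rw [hen]; exact hNlt si.length hm1 hlt
      simp only [pvTrail]
      rw [if_pos hcond]
      rw [ih (si ++ [[]]) (pos ++ [[]]) (st + sws) (en + sws) (by simp) (by simp [hlen])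
        (by simp; omega) (by push_cast [List.length_append]; simp; rw [hen]; ring)
        (by simp; omega)]
      have h1 : ∀ ys : List (List Int), ys ++ [[]] = ys ++ List.replicate 1 ([] : List Int) := by
        simp
      rw [h1 si, h1 pos, pvPad_absorb N 1 si (by omega), pvPad_absorb N 1 pos (by omega)]

-- ===== VERDICT (by name: the statement is the Claim_ definition above) =====
theorem getSnpIndicesInSubWins_spec : Claim_equal_getSnpIndicesInSubWins := by
  intro sws last snpLocs _ hpre
  obtain ⟨hs, hpw, hpos⟩ := hpre
  unfold Spec_getSnpIndicesInSubWins
  set c : Int := -(PySem.Int.floordiv (-last) sws) with hcdef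
  have hbr : (c - 1) * sws < last ∧ last ≤ c * sws :=
    (PySem.Int.neg_floordiv_neg_eq_iff_of_pos (by omega)).mp hcdef.symm
  set N : Nat := (max 1 c).toNat with hNdef
  have hNc : (N : Int) = max 1 c := by
    rw [hNdef]
    have : (1 : Int) ≤ max 1 c := le_max_left _ _
    omega
  have hN1 : 1 ≤ N := by omega
  have hNub : last ≤ (N : Int) * sws := by
    have hmle : c ≤ (N : Int) := by rw [hNc]; exact le_max_right _ _
    have := mul_le_mul_of_nonneg_right hmle (by omega : (0:Int) ≤ sws)
    omega
  have hNlt : ∀ t : Nat, 1 ≤ t → t < N → (t : Int) * sws < last := by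
    intro t ht1 htN
    have hc2 : (2 : Int) ≤ (N : Int) := by omega
    have hNceq : (N : Int) = c := by
      rw [hNc] at hc2 ⊢
      rcases le_total c 1 with h | h
      · rw [max_eq_left h] at hc2; omega
      · rw [max_eq_right h]
    have htc : (t : Int) ≤ c - 1 := by omega
    have := mul_le_mul_of_nonneg_right htc (by omega : (0:Int) ≤ sws)
    omega
  have hmono : ∀ p ∈ PySem.List.enumerate snpLocs 0, p.2 ≤ last → (1 : Int) ≤ p.2 := by
    intro p hp hple
    have hmem : p.2 ∈ snpLocs := by
      rw [← PySem.List.map_snd_enumerate snpLocs 0]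
      exact List.mem_map_of_mem hp
    exact hpos p.2 (List.mem_filter.mpr ⟨hmem, by simpa using hple⟩)
  have hpw0 : (((PySem.List.enumerate snpLocs 0).map Prod.snd).filter
      (fun x => decide (x ≤ last))).Pairwise (· ≤ ·) := by
    rw [PySem.List.map_snd_enumerate snpLocs 0]
    exact hpw
  obtain ⟨si', pos', heq, hne', hlen', hN', hfold⟩ :=
    outer_pad sws last hs N hNub (PySem.List.enumerate snpLocs 0) [[]] [[]] 1 (1 + sws - 1)
      (by simp) rfl (by simpa using hN1) (by simp) (by simp) hmono hpw0
  unfold getSnpIndicesInSubWins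
  simp only
  rw [heq]
  simp only
  have hfuel : N - si'.length < (last - (si'.length : Int) * sws).toNat + 1 := by
    by_cases h : si'.length = N
    · omega
    · have hlt : si'.length < N := by omega
      have hm1' : 1 ≤ si'.length := List.length_pos_of_ne_nil hne'
      have h1 : ((N : Int) - 1) * sws < last := by
        have h2 : 2 ≤ N := by omega
        have h4 := hNlt (N - 1) (by omega) (by omega)
        have h5 : (((N - 1 : Nat)) : Int) = (N : Int) - 1 := by omega
        rw [h5] at h4
        exact h4
      have h2 : (si'.length : Int) * sws ≤ ((N : Int) - 1) * sws :=
        mul_le_mul_of_nonneg_right (by omega) (by omega)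
      have h3 : ((N:Int) - 1 - (si'.length : Int)) * sws ≥ (N:Int) - 1 - (si'.length : Int) := by
        nlinarith [mul_le_mul_of_nonneg_left hs (by omega : (0:Int) ≤ (N:Int) - 1 - (si'.length : Int))]
      have hpos0 : 0 ≤ last - (si'.length : Int) * sws := by omega
      have ht : (((last - (si'.length : Int) * sws).toNat) : Int) = last - (si'.length : Int) * sws :=
        Int.toNat_of_nonneg hpos0
      have hjlin : ((N:Int) - 1 - (si'.length : Int)) * sws
          = ((N:Int) - 1) * sws - (si'.length : Int) * sws := by ring
      omega
  rw [trail_pad sws last hs N hNub hNlt _ si' pos' _ _ hne' hlen' hN' rfl hfuel]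
  unfold getSnpIndicesInSubWins_alt
  simp only
  rw [← hcdef, ← hNdef]
  have hrep : List.replicate N ([] : List Int) = pvPad N [[]] := by
    unfold pvPad
    rw [show N = (N - 1) + 1 from by omega]
    simp [List.replicate_succ]
  rw [hrep, ← hfold]
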